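-- pv_equiv track=rewrite | github.com/nonaninona/algorithm | 백준/Bronze/2810. 컵홀더/컵홀더.py | solve
-- ===== SOURCE A (Python) =====
-- def solve(N, seats):
--     arr = ["*"]
--     i = 0
--     while i < N:
--         if seats[i] == "L":
--             arr += ["L", "L", "*"]
--             i += 1
--         elif seats[i] == "S":
--             arr += ["S", "*"]
--         i += 1
--
--     ret = 0
--     for i in range(1, len(arr)):
--         check1 = arr[i] == "*" and (arr[i-1] == "S" or arr[i-1] == "L")
--         check2 = arr[i-1] == "*" and (arr[i] == "S" or arr[i] == "L")
--         if check1 or check2: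
--             ret += 1
--             arr[i-1] = "checked"
--             arr[i] = "checked"
--     return ret
-- ===== SOURCE B (Python) =====
-- def solve(N, seats):
--     couples = 0
--     singles = 0
--     i = 0
--     while i < N:
--         c = seats[i]
--         if c == "L":
--             couples += 1
--             i += 2
--         elif c == "S":
--             singles += 1
--             i += 1
--         else:
--             i += 1
--     people = 2 * couples + singles
--     holders = couples + singles + 1
--     return people if people < holders else holders
-- ===== Notes on version B (the rewrite author's own statement) =====
-- stated objective: simpler
-- what changed: Replaces A's expanded cup-holder array construction plus greedy adjacent-matching second pass with a single counting pass (couples/singles, preserving the i+=2 skip after 'L') and the closed form min(2*couples+singles, couples+singles+1).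
-- outside the precondition, e.g. on solve(2, 'L'): A returns 2, B returns 2
import Mathlib
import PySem

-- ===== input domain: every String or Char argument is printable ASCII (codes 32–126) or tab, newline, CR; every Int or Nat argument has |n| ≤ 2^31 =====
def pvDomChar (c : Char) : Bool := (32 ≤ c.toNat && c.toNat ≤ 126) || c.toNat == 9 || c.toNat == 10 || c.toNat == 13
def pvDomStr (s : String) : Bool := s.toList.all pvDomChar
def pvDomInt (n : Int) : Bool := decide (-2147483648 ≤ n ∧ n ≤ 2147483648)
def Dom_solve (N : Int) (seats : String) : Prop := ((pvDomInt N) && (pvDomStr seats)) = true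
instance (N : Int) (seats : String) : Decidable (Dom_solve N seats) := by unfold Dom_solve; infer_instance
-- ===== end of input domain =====

-- B replaces A's expanded-array construction + greedy adjacent-matching pass by one counting
-- pass and the closed form min(2*couples+singles, couples+singles+1); objective: simpler.
-- The loop counters are ported with an explicit fuel argument (N.toNat / arr.length - 1 = the
-- exact number of iterations the Python loop performs); this only makes the recursion structural.

-- ===== PORT A =====
-- check1/check2 of A's second pass, as one helper on the two adjacent cells
def pairCond (c0 c1 : String) : Bool :=
  (c1 == "*" && (c0 == "S" || c0 == "L")) || (c0 == "*" && (c1 == "S" || c1 == "L"))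

-- while i < N: append ["L","L","*"] (and skip one extra index) on 'L', ["S","*"] on 'S'; i+=1.
-- pyGet? = none means the Python raises IndexError there; excluded by Pre_solve.
def buildArr (seats : List Char) (N : Int) : Nat → Int → List String → List String
  | 0, _, arr => arr
  | fuel + 1, i, arr =>
    if i < N then
      match PySem.List.pyGet? seats i with
      | some c =>
        if c = 'L' then buildArr seats N fuel (i + 2) (arr ++ ["L", "L", "*"])
        else if c = 'S' then buildArr seats N fuel (i + 1) (arr ++ ["S", "*"])
        else buildArr seats N fuel (i + 1) arr
      | none => arr
    else arr

-- for i in range(1, len(arr)): greedy match + in-place "checked" marking;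
-- the fuel arr.length - 1 is exactly the number of iterations of the Python for-loop.
def scanGo : List String → Nat → Nat → Int → Int
  | _, _, 0, ret => ret
  | arr, i, fuel + 1, ret =>
    if pairCond (arr.getD (i - 1) "") (arr.getD i "") then
      scanGo ((arr.set (i - 1) "checked").set i "checked") (i + 1) fuel (ret + 1)
    else scanGo arr (i + 1) fuel ret

def solve (N : Int) (seats : String) : Int :=
  let arr := buildArr seats.toList N N.toNat 0 ["*"]
  scanGo arr 1 (arr.length - 1) 0

-- ===== PORT B =====
-- one counting pass with the same stepping (i+=2 after 'L'); pyGet? = none means Python B raises too.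
def countLoop (seats : List Char) (N : Int) : Nat → Int → Int → Int → Int × Int
  | 0, _, couples, singles => (couples, singles)
  | fuel + 1, i, couples, singles =>
    if i < N then
      match PySem.List.pyGet? seats i with
      | some c =>
        if c = 'L' then countLoop seats N fuel (i + 2) (couples + 1) singles
        else if c = 'S' then countLoop seats N fuel (i + 1) couples (singles + 1)
        else countLoop seats N fuel (i + 1) couples singles
      | none => (couples, singles)
    else (couples, singles)

def solve_alt (N : Int) (seats : String) : Int :=
  let cs := countLoop seats.toList N N.toNat 0 0 0
  let people := 2 * cs.1 + cs.2
  let holders := cs.1 + cs.2 + 1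
  if people < holders then people else holders

-- ===== PRECONDITION & SPEC =====
-- Pre_ excludes N > len(seats): there A (and B) raises IndexError on almost all such inputs;
-- the sole corner where A still returns (an 'L' at the last index with N = len+1 makes the
-- skip step jump past the end) is excluded with it, and B returns the same value there anyway.
def Pre_solve (N : Int) (seats : String) : Prop := N ≤ (seats.toList.length : Int)
instance (N : Int) (seats : String) : Decidable (Pre_solve N seats) := by unfold Pre_solve; infer_instance
def pvWitness_solve : Int × String := (4, "LSxS")

def Spec_solve (N : Int) (seats : String) (out : Int) : Prop := out = solve_alt N seats
instance (N : Int) (seats : String) (out : Int) : Decidable (Spec_solve N seats out) := by unfold Spec_solve; infer_instance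

-- ===== CLAIM (what is proved, stated in full; the proofs are below) =====
def Claim_equal_solve : Prop := ∀ (N : Int) (seats : String), Dom_solve N seats → Pre_solve N seats → Spec_solve N seats (solve N seats)

-- ===== LEMMAS AND PROOFS =====

-- the abstract block sequence both loops traverse: true = an 'L' couple, false = an 'S' single
def blocksOf (seats : List Char) (N : Int) : Nat → Int → List Bool
  | 0, _ => []
  | fuel + 1, i =>
    if i < N then
      match PySem.List.pyGet? seats i with
      | some c =>
        if c = 'L' then true :: blocksOf seats N fuel (i + 2)
        else if c = 'S' then false :: blocksOf seats N fuel (i + 1)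
        else blocksOf seats N fuel (i + 1)
      | none => []
    else []

def renderBlocks : List Bool → List String
  | [] => []
  | true :: bs => "L" :: "L" :: "*" :: renderBlocks bs
  | false :: bs => "S" :: "*" :: renderBlocks bs

-- what the greedy scan earns on the remaining blocks; first arg: is the cell left of the cursor "*"?
def scanVal : Bool → List Bool → Int
  | _, [] => 0
  | star, false :: bs => 1 + scanVal star bs
  | true, true :: bs => 2 + scanVal false bs
  | false, true :: bs => 1 + scanVal false bs

theorem buildArr_eq (seats : List Char) (N : Int) :
    ∀ (fuel : Nat) (i : Int) (arr : List String),
    buildArr seats N fuel i arr = arr ++ renderBlocks (blocksOf seats N fuel i) := by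
  intro fuel
  induction fuel with
  | zero => intro i arr; simp [buildArr, blocksOf, renderBlocks]
  | succ fuel ih =>
      intro i arr
      rw [buildArr, blocksOf]
      split_ifs with h
      · cases hg : PySem.List.pyGet? seats i with
        | none => simp [renderBlocks]
        | some c =>
            dsimp only
            split_ifs <;> simp [renderBlocks, ih]
      · simp [renderBlocks]

theorem countLoop_eq (seats : List Char) (N : Int) :
    ∀ (fuel : Nat) (i couples singles : Int),
    countLoop seats N fuel i couples singles =
      (couples + ((blocksOf seats N fuel i).count true : Int),
       singles + ((blocksOf seats N fuel i).count false : Int)) := by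
  intro fuel
  induction fuel with
  | zero => intro i c s; simp [countLoop, blocksOf]
  | succ fuel ih =>
      intro i c s
      rw [countLoop, blocksOf]
      split_ifs with h
      · cases hg : PySem.List.pyGet? seats i with
        | none => simp
        | some ch =>
            dsimp only
            split_ifs <;> rw [ih] <;> simp [List.count_cons] <;> omega
      · simp

theorem getD_app (front l : List String) (k : Nat) (d : String) :
    (front ++ l).getD (front.length + k) d = l.getD k d := by
  induction front with
  | nil => simp
  | cons a t ih =>
      simpa [List.cons_append, List.length_cons, Nat.add_right_comm t.length 1 k] using ih

theorem set_app (front l : List String) (k : Nat) (v : String) :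
    (front ++ l).set (front.length + k) v = front ++ l.set k v := by
  induction front with
  | nil => simp
  | cons a t ih =>
      simp only [List.cons_append, List.length_cons, Nat.add_right_comm t.length 1 k,
        List.set_cons_succ, ih]

-- one iteration of the greedy scan at the boundary front | p :: q :: rest
theorem scanGo_step (front : List String) (p q : String) (rest : List String)
    (fuel : Nat) (ret : Int) :
    scanGo (front ++ p :: q :: rest) (front.length + 1) (fuel + 1) ret =
      if pairCond p q then
        scanGo ((front ++ ["checked"]) ++ "checked" :: rest) (front.length + 1 + 1) fuel (ret + 1)
      else
        scanGo ((front ++ [p]) ++ q :: rest) (front.length + 1 + 1) fuel ret := by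
  rw [scanGo]
  have h0 : (front ++ p :: q :: rest).getD (front.length + 1 - 1) "" = p := by
    simpa using getD_app front (p :: q :: rest) 0 ""
  have h1 : (front ++ p :: q :: rest).getD (front.length + 1) "" = q := by
    simpa using getD_app front (p :: q :: rest) 1 ""
  rw [h0, h1]
  cases hc : pairCond p q
  · simp only [Bool.false_eq_true, if_false, List.append_assoc, List.cons_append, List.nil_append]
  · simp only [if_true]
    have e1 : (front ++ p :: q :: rest).set (front.length + 1 - 1) "checked"
        = front ++ "checked" :: q :: rest := by
      simpa using set_app front (p :: q :: rest) 0 "checked"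
    have e2 : (front ++ "checked" :: q :: rest).set (front.length + 1) "checked"
        = front ++ "checked" :: "checked" :: rest := by
      simpa using set_app front ("checked" :: q :: rest) 1 "checked"
    rw [e1, e2]
    simp only [List.append_assoc, List.cons_append, List.nil_append]

theorem scan_main (bs : List Bool) :
    ∀ (front : List String) (p : String) (ret : Int),
    (p = "*" ∨ p = "checked") →
    scanGo (front ++ p :: renderBlocks bs) (front.length + 1) (renderBlocks bs).length ret
      = ret + scanVal (p == "*") bs := by
  induction bs with
  | nil =>
      intro front p ret _
      simp [renderBlocks, scanGo, scanVal]
  | cons b bs ih =>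
      intro front p ret hp
      cases b with
      | false =>
          rcases hp with hp | hp <;> subst hp <;>
            simp only [renderBlocks, List.length_cons]
          · rw [scanGo_step front "*" "S" ("*" :: renderBlocks bs) ((renderBlocks bs).length + 1) ret,
                if_pos (by decide),
                show front.length + 1 + 1 = (front ++ ["checked"]).length + 1 by simp,
                scanGo_step (front ++ ["checked"]) "checked" "*" (renderBlocks bs)
                  (renderBlocks bs).length (ret + 1),
                if_neg (by decide),
                show (front ++ ["checked"]).length + 1 + 1
                  = ((front ++ ["checked"]) ++ ["checked"]).length + 1 by simp,
                ih ((front ++ ["checked"]) ++ ["checked"]) "*" (ret + 1) (Or.inl rfl)]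
            simp [scanVal]; ring
          · rw [scanGo_step front "checked" "S" ("*" :: renderBlocks bs) ((renderBlocks bs).length + 1) ret,
                if_neg (by decide),
                show front.length + 1 + 1 = (front ++ ["checked"]).length + 1 by simp,
                scanGo_step (front ++ ["checked"]) "S" "*" (renderBlocks bs)
                  (renderBlocks bs).length ret,
                if_pos (by decide),
                show (front ++ ["checked"]).length + 1 + 1
                  = ((front ++ ["checked"]) ++ ["checked"]).length + 1 by simp,
                ih ((front ++ ["checked"]) ++ ["checked"]) "checked" (ret + 1) (Or.inr rfl)]
            simp [scanVal]; ring
      | true =>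
          rcases hp with hp | hp <;> subst hp <;>
            simp only [renderBlocks, List.length_cons]
          · rw [scanGo_step front "*" "L" ("L" :: "*" :: renderBlocks bs)
                  ((renderBlocks bs).length + 1 + 1) ret,
                if_pos (by decide),
                show front.length + 1 + 1 = (front ++ ["checked"]).length + 1 by simp,
                scanGo_step (front ++ ["checked"]) "checked" "L" ("*" :: renderBlocks bs)
                  ((renderBlocks bs).length + 1) (ret + 1),
                if_neg (by decide),
                show (front ++ ["checked"]).length + 1 + 1
                  = ((front ++ ["checked"]) ++ ["checked"]).length + 1 by simp,
                scanGo_step ((front ++ ["checked"]) ++ ["checked"]) "L" "*" (renderBlocks bs)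
                  (renderBlocks bs).length (ret + 1),
                if_pos (by decide),
                show ((front ++ ["checked"]) ++ ["checked"]).length + 1 + 1
                  = (((front ++ ["checked"]) ++ ["checked"]) ++ ["checked"]).length + 1 by simp,
                ih (((front ++ ["checked"]) ++ ["checked"]) ++ ["checked"]) "checked"
                  (ret + 1 + 1) (Or.inr rfl)]
            simp [scanVal]; ring
          · rw [scanGo_step front "checked" "L" ("L" :: "*" :: renderBlocks bs)
                  ((renderBlocks bs).length + 1 + 1) ret,
                if_neg (by decide),
                show front.length + 1 + 1 = (front ++ ["checked"]).length + 1 by simp,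
                scanGo_step (front ++ ["checked"]) "L" "L" ("*" :: renderBlocks bs)
                  ((renderBlocks bs).length + 1) ret,
                if_neg (by decide),
                show (front ++ ["checked"]).length + 1 + 1
                  = ((front ++ ["checked"]) ++ ["L"]).length + 1 by simp,
                scanGo_step ((front ++ ["checked"]) ++ ["L"]) "L" "*" (renderBlocks bs)
                  (renderBlocks bs).length ret,
                if_pos (by decide),
                show ((front ++ ["checked"]) ++ ["L"]).length + 1 + 1
                  = (((front ++ ["checked"]) ++ ["L"]) ++ ["checked"]).length + 1 by simp,
                ih (((front ++ ["checked"]) ++ ["L"]) ++ ["checked"]) "checked"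
                  (ret + 1) (Or.inr rfl)]
            simp [scanVal]; ring

theorem scanVal_false (bs : List Bool) : scanVal false bs = (bs.length : Int) := by
  induction bs with
  | nil => simp [scanVal]
  | cons b t ih => cases b <;> simp [scanVal, ih] <;> push_cast <;> ring

theorem scanVal_true (bs : List Bool) :
    scanVal true bs = (bs.length : Int) + (if true ∈ bs then 1 else 0) := by
  induction bs with
  | nil => simp [scanVal]
  | cons b t ih =>
    cases b
    · simp [scanVal, ih]; split_ifs <;> push_cast <;> ring
    · rw [scanVal, scanVal_false]; simp; push_cast; ring

theorem count_len (bs : List Bool) : bs.count true + bs.count false = bs.length := by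
  induction bs with
  | nil => simp
  | cons b t ih => cases b <;> simp [List.count_cons] <;> omega

-- ===== VERDICT (by name: the statement is the Claim_ definition above) =====
theorem solve_spec : Claim_equal_solve := by
  intro N seats _ _
  unfold Spec_solve solve solve_alt
  have hb : buildArr seats.toList N N.toNat 0 ["*"]
      = [] ++ "*" :: renderBlocks (blocksOf seats.toList N N.toNat 0) := by
    rw [buildArr_eq]; rfl
  have hc : countLoop seats.toList N N.toNat 0 0 0
      = (((blocksOf seats.toList N N.toNat 0).count true : Int),
         ((blocksOf seats.toList N N.toNat 0).count false : Int)) := by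
    rw [countLoop_eq]; simp
  set bs := blocksOf seats.toList N N.toNat 0 with hbs
  have hm := scan_main bs [] "*" 0 (Or.inl rfl)
  simp only [List.nil_append, List.length_nil, Nat.zero_add] at hm
  simp only [hb, hc, List.nil_append, List.length_cons, Nat.add_sub_cancel]
  rw [hm]
  have hval : scanVal ("*" == "*") bs = (bs.length : Int) + (if true ∈ bs then 1 else 0) :=
    scanVal_true bs
  rw [hval]
  have hcl := count_len bs
  have hmem : true ∈ bs ↔ bs.count true ≠ 0 := by
    simp [List.count_pos_iff.symm, Nat.pos_iff_ne_zero]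
  by_cases hmemb : true ∈ bs
  · have hne : bs.count true ≠ 0 := hmem.mp hmemb
    have hnlt : ¬ (2 * (bs.count true : Int) + (bs.count false : Int)
        < (bs.count true : Int) + (bs.count false : Int) + 1) := by push_cast; omega
    simp only [hmemb, if_true, hnlt, if_false]
    push_cast; omega
  · have heq : bs.count true = 0 := by by_contra h; exact hmemb (hmem.mpr h)
    have hlt : 2 * (bs.count true : Int) + (bs.count false : Int)
        < (bs.count true : Int) + (bs.count false : Int) + 1 := by push_cast; omega
    simp only [hmemb, if_false, hlt, if_true]
    push_cast; omega
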